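-- pv_equiv track=rewrite | github.com/maateonicolas/buscaminas-marie | src/generador_tablero.py | crear_mascara_personalizada
-- ===== SOURCE A (Python) =====
-- from typing import List, Optional, Sequence, Tuple
--
-- Mascara = List[List[int]]
--
-- Coordenada = Tuple[int, int]
--
-- def validar_coordenada(fila: int, columna: int, filas: int, columnas: int) -> bool:
--     """
--     Verifica si una coordenada está dentro del tablero.
--     """
--     return 0 <= fila < filas and 0 <= columna < columnas
--
-- def crear_mascara_personalizada(
--         activas: Sequence[Coordenada],
--         filas: int = 16,
--         columnas: int = 16,
-- ) -> Mascara: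
--     """
--     Genera una máscara manual a partir de coordenadas activas.
--     """
--     mascara = [[0 for _ in range(columnas)] for _ in range(filas)]
--     for fila, columna in activas:
--         if not validar_coordenada(fila, columna, filas, columnas):
--             raise ValueError(f"Coordenada fuera de rango: {(fila, columna)}")
--         mascara[fila][columna] = 1
--     return mascara
-- ===== SOURCE B (Python) =====
-- def crear_mascara_personalizada(activas, filas=16, columnas=16):
--     for fila, columna in activas:
--         if not (0 <= fila < filas and 0 <= columna < columnas):
--             raise ValueError(f"Coordenada fuera de rango: {(fila, columna)}")
--     activas_set = set(activas)
--     return [[1 if (f, c) in activas_set else 0 for c in range(columnas)]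
--             for f in range(filas)]
-- ===== Notes on version B (the rewrite author's own statement) =====
-- stated objective: idiomatic
-- what changed: A allocates a zero grid and writes 1 into it cell-by-cell driven by the coordinate list; B validates once, builds a set of the active coordinates and constructs the grid in a single nested comprehension testing membership for every cell.
import Mathlib
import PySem

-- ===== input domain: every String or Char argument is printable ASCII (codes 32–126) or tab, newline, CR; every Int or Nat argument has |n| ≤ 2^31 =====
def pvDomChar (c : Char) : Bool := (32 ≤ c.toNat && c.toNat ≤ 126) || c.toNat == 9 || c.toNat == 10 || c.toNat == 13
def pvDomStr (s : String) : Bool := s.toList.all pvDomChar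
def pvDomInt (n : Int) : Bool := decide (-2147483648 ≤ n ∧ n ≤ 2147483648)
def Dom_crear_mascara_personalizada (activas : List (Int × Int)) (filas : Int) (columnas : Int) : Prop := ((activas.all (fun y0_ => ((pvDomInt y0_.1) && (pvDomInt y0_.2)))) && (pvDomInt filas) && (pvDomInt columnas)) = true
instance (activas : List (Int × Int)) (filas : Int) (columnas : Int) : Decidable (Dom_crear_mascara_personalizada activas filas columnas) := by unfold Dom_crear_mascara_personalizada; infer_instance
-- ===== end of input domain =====

-- B builds the grid by a nested comprehension testing membership in a prebuilt set of the
-- active coordinates, instead of A's writing 1s into a preallocated zero grid (idiomatic).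


-- ===== PORT A =====
def validar_coordenada (fila columna filas columnas : Int) : Bool :=
  decide (0 ≤ fila ∧ fila < filas) && decide (0 ≤ columna ∧ columna < columnas)

def crear_mascara_personalizada (activas : List (Int × Int)) (filas : Int) (columnas : Int) : List (List Int) :=
  let mascara := (PySem.List.pyRange 0 filas).map (fun _ => (PySem.List.pyRange 0 columnas).map (fun _ => (0 : Int)))
  activas.foldl (fun m pc =>
    if validar_coordenada pc.1 pc.2 filas columnas then
      PySem.List.pySetD m pc.1 (PySem.List.pySetD (PySem.List.pyGetD m pc.1 []) pc.2 1)
    else m  -- Python raises ValueError here; such inputs are outside Pre_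
    ) mascara

-- ===== PORT B =====
def crear_mascara_personalizada_alt (activas : List (Int × Int)) (filas : Int) (columnas : Int) : List (List Int) :=
  -- B's validation pass only raises (outside Pre_); it does not contribute to the returned value
  let activas_set : PySem.Set (Int × Int) := PySem.Set.ofList activas
  (PySem.List.pyRange 0 filas).map (fun f =>
    (PySem.List.pyRange 0 columnas).map (fun c =>
      if PySem.Set.contains activas_set (f, c) then (1 : Int) else 0))

-- ===== PRECONDITION & SPEC =====
-- Pre_ excludes exactly the inputs where A (and B) raise ValueError: a coordinate out of range.
def Pre_crear_mascara_personalizada (activas : List (Int × Int)) (filas : Int) (columnas : Int) : Prop :=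
  ∀ p ∈ activas, 0 ≤ p.1 ∧ p.1 < filas ∧ 0 ≤ p.2 ∧ p.2 < columnas
instance (activas : List (Int × Int)) (filas : Int) (columnas : Int) : Decidable (Pre_crear_mascara_personalizada activas filas columnas) := by unfold Pre_crear_mascara_personalizada; infer_instance

def pvWitness_crear_mascara_personalizada : (List (Int × Int)) × Int × Int := ([(0, 0), (1, 2)], 3, 3)

def Spec_crear_mascara_personalizada (activas : List (Int × Int)) (filas : Int) (columnas : Int) (out : List (List Int)) : Prop := out = crear_mascara_personalizada_alt activas filas columnas
instance (activas : List (Int × Int)) (filas : Int) (columnas : Int) (out : List (List Int)) : Decidable (Spec_crear_mascara_personalizada activas filas columnas out) := by unfold Spec_crear_mascara_personalizada; infer_instance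

-- ===== CLAIM (what is proved, stated in full; the proofs are below) =====
def Claim_equal_crear_mascara_personalizada : Prop := ∀ (activas : List (Int × Int)) (filas : Int) (columnas : Int), Dom_crear_mascara_personalizada activas filas columnas → Pre_crear_mascara_personalizada activas filas columnas → Spec_crear_mascara_personalizada activas filas columnas (crear_mascara_personalizada activas filas columnas)

-- ===== LEMMAS AND PROOFS =====

/-- entry of a grid, for reasoning pointwise -/
def pvEntry (m : List (List Int)) (i j : Nat) : Int := (m.getD i []).getD j 0

/-- A's loop body -/
def pvStep (filas columnas : Int) (m : List (List Int)) (pc : Int × Int) : List (List Int) :=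
  if validar_coordenada pc.1 pc.2 filas columnas then
    PySem.List.pySetD m pc.1 (PySem.List.pySetD (PySem.List.pyGetD m pc.1 []) pc.2 1)
  else m

lemma pvFold_main (filas columnas : Int) :
    ∀ (activas : List (Int × Int)) (m : List (List Int)),
    (∀ p ∈ activas, 0 ≤ p.1 ∧ p.1 < filas ∧ 0 ≤ p.2 ∧ p.2 < columnas) →
    m.length = filas.toNat →
    (∀ row ∈ m, row.length = columnas.toNat) →
    (activas.foldl (pvStep filas columnas) m).length = filas.toNat ∧
    (∀ row ∈ activas.foldl (pvStep filas columnas) m, row.length = columnas.toNat) ∧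
    (∀ i j, i < filas.toNat → j < columnas.toNat →
      pvEntry (activas.foldl (pvStep filas columnas) m) i j
        = if ((i : Int), (j : Int)) ∈ activas then 1 else pvEntry m i j) := by
  intro activas
  induction activas with
  | nil => intro m _ hlen hrow; exact ⟨hlen, hrow, fun i j _ _ => by simp [pvEntry]⟩
  | cons p rest ih =>
    intro m hvalid hlen hrow
    obtain ⟨hp1, hp1f, hp2, hp2c⟩ := hvalid p (List.mem_cons_self ..)
    have hval : validar_coordenada p.1 p.2 filas columnas = true := by
      simp [validar_coordenada]; omega
    have ha : p.1.toNat < m.length := by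
      rw [hlen]; omega
    have hr : m.getD p.1.toNat [] = m[p.1.toNat] := List.getD_eq_getElem _ _ ha
    have hrmem : m[p.1.toNat] ∈ m := List.getElem_mem ha
    have hrlen : (m.getD p.1.toNat []).length = columnas.toNat := by
      rw [hr]; exact hrow _ hrmem
    have hb : p.2.toNat < (m.getD p.1.toNat []).length := by
      rw [hrlen]; omega
    have hstep : pvStep filas columnas m p
        = m.set p.1.toNat ((m.getD p.1.toNat []).set p.2.toNat 1) := by
      simp [pvStep, hval, PySem.List.pySetD_of_nonneg _ _ hp1,
        PySem.List.pySetD_of_nonneg _ _ hp2, PySem.List.pyGetD_of_nonneg _ _ hp1]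
    set m' := pvStep filas columnas m p with hm'
    have hlen' : m'.length = filas.toNat := by
      rw [hstep, List.length_set, hlen]
    have hrow' : ∀ row ∈ m', row.length = columnas.toNat := by
      intro row hmem
      rw [hstep] at hmem
      rcases List.mem_or_eq_of_mem_set hmem with h | h
      · exact hrow _ h
      · rw [h, List.length_set, hrlen]
    have hvalid' : ∀ q ∈ rest, 0 ≤ q.1 ∧ q.1 < filas ∧ 0 ≤ q.2 ∧ q.2 < columnas :=
      fun q hq => hvalid q (List.mem_cons_of_mem _ hq)
    obtain ⟨ih1, ih2, ih3⟩ := ih m' hvalid' hlen' hrow'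
    refine ⟨by simpa [List.foldl_cons] using ih1, by simpa [List.foldl_cons] using ih2, ?_⟩
    intro i j hi hj
    have hent' : pvEntry m' i j
        = if i = p.1.toNat ∧ j = p.2.toNat then 1 else pvEntry m i j := by
      have hi' : i < m.length := by rw [hlen]; exact hi
      have hilen : i < (m.set p.1.toNat ((m.getD p.1.toNat []).set p.2.toNat 1)).length := by
        rw [List.length_set]; exact hi'
      unfold pvEntry
      rw [hstep, List.getD_eq_getElem _ _ hilen, List.getElem_set]
      by_cases hia : p.1.toNat = i
      · subst hia
        simp only [if_true, true_and]
        have hjlen : j < ((m.getD p.1.toNat []).set p.2.toNat 1).length := by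
          rw [List.length_set, hrlen]; exact hj
        rw [List.getD_eq_getElem _ _ hjlen, List.getElem_set]
        by_cases hjb : p.2.toNat = j
        · simp [hjb]
        · have hj' : j < (m.getD p.1.toNat []).length := by rw [hrlen]; exact hj
          rw [if_neg hjb, if_neg (fun h => hjb h.symm), List.getD_eq_getElem _ _ hj']
      · rw [if_neg hia, if_neg (by tauto : ¬(i = p.1.toNat ∧ j = p.2.toNat))]
        rw [List.getD_eq_getElem _ _ hi']
    have hmemiff : ((i : Int), (j : Int)) = p ↔ i = p.1.toNat ∧ j = p.2.toNat := by
      constructor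
      · intro h
        constructor
        · have := congrArg Prod.fst h; simp at this; omega
        · have := congrArg Prod.snd h; simp at this; omega
      · intro ⟨h1, h2⟩
        have : ((i : Int)) = p.1 := by omega
        have h2' : ((j : Int)) = p.2 := by omega
        exact Prod.ext this h2'
    have hfold : (p :: rest).foldl (pvStep filas columnas) m
        = rest.foldl (pvStep filas columnas) m' := by
      simp [List.foldl_cons, hm']
    rw [hfold, ih3 i j hi hj, hent']
    by_cases hrm : ((i : Int), (j : Int)) ∈ rest
    · simp [hrm]
    · by_cases heq : ((i : Int), (j : Int)) = p
      · obtain ⟨h1, h2⟩ := hmemiff.mp heq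
        rw [if_neg hrm, if_pos ⟨h1, h2⟩, if_pos (by rw [heq]; exact List.mem_cons_self ..)]
      · rw [if_neg hrm, if_neg (fun h => heq (hmemiff.mpr h)),
          if_neg (by simp [List.mem_cons, heq, hrm])]

lemma pvGrid_ext (m1 m2 : List (List Int)) (F C : Nat)
    (hl1 : m1.length = F) (hl2 : m2.length = F)
    (hr1 : ∀ row ∈ m1, row.length = C) (hr2 : ∀ row ∈ m2, row.length = C)
    (he : ∀ i j, i < F → j < C → pvEntry m1 i j = pvEntry m2 i j) : m1 = m2 := by
  apply List.ext_getElem (by omega)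
  intro i hi1 hi2
  have hc1 : m1[i].length = C := hr1 _ (List.getElem_mem hi1)
  have hc2 : m2[i].length = C := hr2 _ (List.getElem_mem hi2)
  apply List.ext_getElem (by omega)
  intro j hj1 hj2
  have h := he i j (by omega) (by omega)
  unfold pvEntry at h
  rw [List.getD_eq_getElem _ _ hi1, List.getD_eq_getElem _ _ hi2,
    List.getD_eq_getElem _ _ hj1, List.getD_eq_getElem _ _ hj2] at h
  exact h

-- ===== VERDICT (by name: the statement is the Claim_ definition above) =====
theorem crear_mascara_personalizada_spec : Claim_equal_crear_mascara_personalizada := by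
  unfold Claim_equal_crear_mascara_personalizada
  intro activas filas columnas _ hpre
  unfold Spec_crear_mascara_personalizada
  set init := (PySem.List.pyRange 0 filas).map
    (fun _ => (PySem.List.pyRange 0 columnas).map (fun _ => (0 : Int))) with hinit
  have hA : crear_mascara_personalizada activas filas columnas
      = activas.foldl (pvStep filas columnas) init := rfl
  have hinitlen : init.length = filas.toNat := by
    simp [hinit, PySem.List.length_pyRange_one]
  have hinitrow : ∀ row ∈ init, row.length = columnas.toNat := by
    intro row hr
    rw [hinit, List.mem_map] at hr
    obtain ⟨x, _, rfl⟩ := hr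
    simp [PySem.List.length_pyRange_one]
  have hinitent : ∀ i j, i < filas.toNat → j < columnas.toNat → pvEntry init i j = 0 := by
    intro i j hi hj
    have hi' : i < init.length := by rw [hinitlen]; exact hi
    unfold pvEntry
    rw [List.getD_eq_getElem _ _ hi']
    have hrw : init[i] = (PySem.List.pyRange 0 columnas).map (fun _ => (0 : Int)) := by
      simp [hinit]
    rw [hrw]
    have hj' : j < ((PySem.List.pyRange 0 columnas).map (fun _ => (0 : Int))).length := by
      simp [PySem.List.length_pyRange_one]; omega
    rw [List.getD_eq_getElem _ _ hj']
    simp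
  obtain ⟨h1, h2, h3⟩ := pvFold_main filas columnas activas init hpre hinitlen hinitrow
  have hBdef : crear_mascara_personalizada_alt activas filas columnas
      = (PySem.List.pyRange 0 filas).map (fun f =>
          (PySem.List.pyRange 0 columnas).map (fun c =>
            if PySem.Set.contains (PySem.Set.ofList activas) (f, c) then (1 : Int) else 0)) := rfl
  have hBlen : (crear_mascara_personalizada_alt activas filas columnas).length = filas.toNat := by
    simp [hBdef, PySem.List.length_pyRange_one]
  have hBrow : ∀ row ∈ crear_mascara_personalizada_alt activas filas columnas,
      row.length = columnas.toNat := by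
    intro row hr
    rw [hBdef, List.mem_map] at hr
    obtain ⟨x, _, rfl⟩ := hr
    simp [PySem.List.length_pyRange_one]
  have hBent : ∀ i j, i < filas.toNat → j < columnas.toNat →
      pvEntry (crear_mascara_personalizada_alt activas filas columnas) i j
        = if ((i : Int), (j : Int)) ∈ activas then 1 else 0 := by
    intro i j hi hj
    unfold pvEntry
    rw [hBdef]
    have hi' : i < ((PySem.List.pyRange 0 filas).map (fun f =>
          (PySem.List.pyRange 0 columnas).map (fun c =>
            if PySem.Set.contains (PySem.Set.ofList activas) (f, c) then (1 : Int) else 0))).length := by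
      simp [PySem.List.length_pyRange_one]; omega
    rw [List.getD_eq_getElem _ _ hi', List.getElem_map, PySem.List.getElem_pyRange_one]
    have hj' : j < ((PySem.List.pyRange 0 columnas).map (fun c =>
          if PySem.Set.contains (PySem.Set.ofList activas) ((0 : Int) + (i : Int), c) then (1 : Int) else 0)).length := by
      simp [PySem.List.length_pyRange_one]; omega
    rw [List.getD_eq_getElem _ _ hj', List.getElem_map, PySem.List.getElem_pyRange_one]
    simp only [zero_add]
    by_cases hm : ((i : Int), (j : Int)) ∈ activas
    · rw [if_pos hm, if_pos (by rw [PySem.Set.contains_iff]; exact (PySem.Set.mem_ofList activas _).mpr hm)]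
    · rw [if_neg hm, if_neg (fun h => hm ((PySem.Set.mem_ofList activas _).mp
        (by rw [← PySem.Set.contains_iff]; exact h)))]
  rw [hA]
  apply pvGrid_ext _ _ filas.toNat columnas.toNat h1 hBlen h2 hBrow
  intro i j hi hj
  rw [h3 i j hi hj, hinitent i j hi hj, hBent i j hi hj]
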